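-- pv_equiv track=rewrite | github.com/alimrrc/Fama-French-backtesting-interface-using-Bloomberg-API | Portfolio_Allocation_Bloomberg.py | keep_unique_values
-- ===== SOURCE A (Python) =====
-- def keep_unique_values(list1, list2):
--     """
--     This function returns two modified lists that no longer have any duplicates. This function will be useful
--     if you don't want to have lists of tickers that you are going to short and lists of tickers that you are
--      going to sell long with a common ticker.
--
--         Args:
--             list1: A list of values.
--             list2: Another list of values.
--
--         Returns:
--             Two lists modified to contain only unique only the unique values.
--
--     """
--     unique_values = set(list1 + list2)
--     for value in unique_values:
--         count1 = list1.count(value)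
--         count2 = list2.count(value)
--         if count1 > count2:
--             if count2 != 0:
--                 list2 = [x for x in list2 if x != value]
--             while count1 > 1:
--                 list1.remove(value)
--                 count1 -= 1
--         elif count2 > count1:
--             if count1 != 0:
--                 list1 = [x for x in list1 if x != value]
--             while count2 > 1:
--                 list2.remove(value)
--                 count2 -= 1
--         else:
--             list1 = [x for x in list1 if x != value]
--             list2 = [x for x in list2 if x != value]
--     return (list1, list2)
-- ===== SOURCE B (Python) =====
-- def keep_unique_values(list1, list2):
--     c1 = {}
--     for x in list1:
--         c1[x] = c1.get(x, 0) + 1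
--     c2 = {}
--     for x in list2:
--         c2[x] = c2.get(x, 0) + 1
--
--     def keep_majority(src, own, other):
--         out = []
--         seen = set()
--         for x in reversed(src):
--             if own[x] > other.get(x, 0) and x not in seen:
--                 out.append(x)
--                 seen.add(x)
--         out.reverse()
--         return out
--
--     return (keep_majority(list1, c1, c2), keep_majority(list2, c2, c1))
-- ===== Notes on version B (the rewrite author's own statement) =====
-- stated objective: faster
-- what changed: Replaced A's loop over the unique-value set with repeated .count scans, list-comprehension rebuilds and in-place .remove calls by two counting dicts built once plus one reversed pass per list with a seen-set, keeping the last occurrence of each majority value.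
import Mathlib
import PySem

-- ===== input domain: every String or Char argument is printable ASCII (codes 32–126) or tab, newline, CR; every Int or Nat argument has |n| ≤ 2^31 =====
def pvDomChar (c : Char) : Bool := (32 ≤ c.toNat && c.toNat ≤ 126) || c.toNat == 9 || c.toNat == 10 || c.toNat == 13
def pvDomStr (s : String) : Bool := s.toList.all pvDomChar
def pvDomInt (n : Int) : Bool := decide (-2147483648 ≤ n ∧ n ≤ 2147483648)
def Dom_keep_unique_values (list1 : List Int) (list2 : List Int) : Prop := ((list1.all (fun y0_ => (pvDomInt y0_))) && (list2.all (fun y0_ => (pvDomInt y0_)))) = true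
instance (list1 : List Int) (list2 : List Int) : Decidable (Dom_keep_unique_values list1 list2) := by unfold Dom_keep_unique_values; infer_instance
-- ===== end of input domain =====

-- B replaces A's per-unique-value count/remove passes by counters plus one reversed pass per list
-- (A mutates its argument lists in place in some cases; the equivalence proved here is about the return value only).


-- ===== PORT A =====
-- 'while count1 > 1: list1.remove(value); count1 -= 1' — n successive first-occurrence removals;
-- the .getD fallback is never taken under the guard n ≤ count - 1 (Python's ValueError cannot occur there)
def pvRemoveTimes (l : List Int) (v : Int) : Nat → List Int
  | 0 => l
  | n + 1 => pvRemoveTimes ((PySem.List.remove? l v).getD l) v n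

-- one iteration of A's 'for value in unique_values' loop, state = (list1, list2)
def pvStepA (p : List Int × List Int) (value : Int) : List Int × List Int :=
  let count1 := PySem.List.count p.1 value
  let count2 := PySem.List.count p.2 value
  if count1 > count2 then
    let l2 := if count2 ≠ 0 then p.2.filter (fun x => x != value) else p.2
    let l1 := pvRemoveTimes p.1 value (count1 - 1)
    (l1, l2)
  else if count2 > count1 then
    let l1 := if count1 ≠ 0 then p.1.filter (fun x => x != value) else p.1
    let l2 := pvRemoveTimes p.2 value (count2 - 1)
    (l1, l2)
  else
    (p.1.filter (fun x => x != value), p.2.filter (fun x => x != value))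

-- iteration over set(list1+list2): the per-value steps commute (proved below), so the hash order is immaterial
def keep_unique_values (list1 : List Int) (list2 : List Int) : List (List Int) :=
  [((PySem.Set.ofList (list1 ++ list2)).foldl pvStepA (list1, list2)).1,
   ((PySem.Set.ofList (list1 ++ list2)).foldl pvStepA (list1, list2)).2]

-- ===== PORT B =====
-- c[x] = c.get(x, 0) + 1 over the list
def pvCounter (l : List Int) : PySem.Dict Int Int :=
  l.foldl (fun d x => d.insert x (d.getD x 0 + 1)) PySem.Dict.empty

-- reversed pass with a seen-set; own[x] is always present (x ∈ src), so .getD x 0 is exact for own[x]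
def pvKeepMaj (src : List Int) (own other : PySem.Dict Int Int) : List Int :=
  let p := src.reverse.foldl
    (fun (st : List Int × PySem.Set Int) x =>
      if decide (own.getD x 0 > other.getD x 0) && !(PySem.Set.contains st.2 x)
      then (st.1 ++ [x], PySem.Set.add st.2 x) else st)
    ([], PySem.Set.empty)
  p.1.reverse

def keep_unique_values_alt (list1 : List Int) (list2 : List Int) : List (List Int) :=
  [pvKeepMaj list1 (pvCounter list1) (pvCounter list2),
   pvKeepMaj list2 (pvCounter list2) (pvCounter list1)]

-- ===== PRECONDITION & SPEC =====
def Spec_keep_unique_values (list1 : List Int) (list2 : List Int) (out : List (List Int)) : Prop := out = keep_unique_values_alt list1 list2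
instance (list1 : List Int) (list2 : List Int) (out : List (List Int)) : Decidable (Spec_keep_unique_values list1 list2 out) := by unfold Spec_keep_unique_values; infer_instance

-- ===== CLAIM (what is proved, stated in full; the proofs are below) =====
def Claim_equal_keep_unique_values : Prop := ∀ (list1 : List Int) (list2 : List Int), Dom_keep_unique_values list1 list2 → Spec_keep_unique_values list1 list2 (keep_unique_values list1 list2)

-- ===== LEMMAS AND PROOFS =====

-- canonical form both ports are reduced to: keep x iff keep x ∧ x is a last occurrence
def pvLastFilter (keep : Int → Bool) : List Int → List Int
  | [] => []
  | x :: t => if keep x && !(decide (x ∈ t)) then x :: pvLastFilter keep t else pvLastFilter keep t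

-- A's one-value effect in pure form
def pvKeepLast (v : Int) : List Int → List Int
  | [] => []
  | x :: t => if x = v then (if v ∈ t then pvKeepLast v t else x :: pvKeepLast v t)
              else x :: pvKeepLast v t

def pvProc (v : Int) (a b : List Int) : List Int :=
  if a.count v > b.count v then pvKeepLast v a else a.filter (fun x => x != v)

-- multi-value filter: values in vs are resolved, others left alone
def pvMF (keep : Int → Bool) (vs : List Int) : List Int → List Int
  | [] => []
  | x :: t => if x ∈ vs then (if keep x && !(decide (x ∈ t)) then x :: pvMF keep vs t else pvMF keep vs t)
              else x :: pvMF keep vs t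

theorem pvKeepLast_of_not_mem (v : Int) (a : List Int) (h : v ∉ a) : pvKeepLast v a = a := by
  induction a with
  | nil => rfl
  | cons x t ih =>
    simp only [List.mem_cons, not_or] at h
    simp [pvKeepLast, Ne.symm h.1, ih h.2]

theorem pvMem_keepLast (v x : Int) (a : List Int) (hx : x ≠ v) : x ∈ pvKeepLast v a ↔ x ∈ a := by
  induction a with
  | nil => simp [pvKeepLast]
  | cons y t ih =>
    by_cases hy : y = v
    · subst hy
      by_cases hm : y ∈ t <;> simp [pvKeepLast, hm, ih, hx, Ne.symm hx]
    · simp [pvKeepLast, hy, ih]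

theorem pvCount_keepLast_ne (v w : Int) (a : List Int) (h : w ≠ v) :
    (pvKeepLast v a).count w = a.count w := by
  induction a with
  | nil => rfl
  | cons x t ih =>
    by_cases hx : x = v
    · subst hx
      by_cases hm : x ∈ t <;>
        simp [pvKeepLast, hm, ih, List.count_cons, Ne.symm h, h]
    · simp [pvKeepLast, hx, List.count_cons, ih]

theorem pvCount_filter_ne (v w : Int) (a : List Int) (h : w ≠ v) :
    (a.filter (fun x => x != v)).count w = a.count w := by
  induction a with
  | nil => rfl
  | cons x t ih =>
    by_cases hx : x = v
    · subst hx; simp [List.count_cons, Ne.symm h, ih]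
    · simp [List.filter_cons, hx, List.count_cons, ih]

theorem pvFilter_ne_of_count_zero (v : Int) (a : List Int) (h : a.count v = 0) :
    a.filter (fun x => x != v) = a := by
  rw [List.count_eq_zero] at h
  rw [List.filter_eq_self]
  intro x hx
  simp only [bne_iff_ne, ne_eq]
  rintro rfl; exact h hx

theorem pvRemoveTimes_cons_ne (v x : Int) (n : Nat) :
    ∀ t : List Int, x ≠ v → n ≤ t.count v → pvRemoveTimes (x :: t) v n = x :: pvRemoveTimes t v n := by
  induction n with
  | zero => intro t _ _; rfl
  | succ m ih =>
    intro t hx hc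
    have hmem : v ∈ t := List.count_pos_iff.mp (by omega)
    have h2 : PySem.List.remove? t v = some (t.erase v) := PySem.List.remove?_eq_some_erase t v hmem
    have h1 : PySem.List.remove? (x :: t) v = some (x :: t.erase v) := by
      rw [PySem.List.remove?_cons_of_ne t hx, h2]; rfl
    have hce : (t.erase v).count v = t.count v - 1 := by
      simp [List.count_erase_self]
    simp only [pvRemoveTimes, h1, h2, Option.getD_some]
    exact ih (t.erase v) hx (by omega)

theorem pvRemoveTimes_eq_keepLast (v : Int) (a : List Int) :
    pvRemoveTimes a v (a.count v - 1) = pvKeepLast v a := by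
  induction a with
  | nil => rfl
  | cons x t ih =>
    by_cases hx : x = v
    · subst hx
      rcases Nat.eq_zero_or_pos (t.count x) with h0 | hpos
      · have hnm : x ∉ t := List.count_eq_zero.mp h0
        simp [List.count_cons_self, h0, pvRemoveTimes, pvKeepLast, hnm,
          pvKeepLast_of_not_mem x t hnm]
      · have hmem : x ∈ t := List.count_pos_iff.mp hpos
        have : (x :: t).count x - 1 = (t.count x - 1) + 1 := by
          simp [List.count_cons_self]; omega
        rw [this]
        simp only [pvRemoveTimes, PySem.List.remove?_cons_self, Option.getD_some]
        simp [pvKeepLast, hmem, ih]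
    · have hcc : (x :: t).count v = t.count v := by simp [List.count_cons, hx]
      rw [hcc, pvRemoveTimes_cons_ne v x (t.count v - 1) t hx (by omega)]
      simp [pvKeepLast, hx, ih]

theorem pvStepA_eq (a b : List Int) (v : Int) :
    pvStepA (a, b) v = (pvProc v a b, pvProc v b a) := by
  simp only [pvStepA, pvProc, PySem.List.count_eq]
  by_cases h1 : a.count v > b.count v
  · have h2 : ¬ b.count v > a.count v := by omega
    simp only [h1, if_pos, if_neg h2, if_true]
    by_cases hz : b.count v = 0
    · simp [hz, pvRemoveTimes_eq_keepLast, pvFilter_ne_of_count_zero v b hz, h1, h2]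
    · simp [hz, pvRemoveTimes_eq_keepLast, h1, h2]
  · by_cases h2 : b.count v > a.count v
    · simp only [gt_iff_lt, h1, if_neg, if_false, h2, if_pos, if_true]
      by_cases hz : a.count v = 0
      · simp [hz, pvRemoveTimes_eq_keepLast, pvFilter_ne_of_count_zero v a hz, h1, h2]
      · simp [hz, pvRemoveTimes_eq_keepLast, h1, h2]
    · simp [h1, h2]

theorem pvCount_proc_ne (v w : Int) (a b : List Int) (h : w ≠ v) :
    (pvProc v a b).count w = a.count w := by
  unfold pvProc
  split
  · exact pvCount_keepLast_ne v w a h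
  · exact pvCount_filter_ne v w a h

-- resolving value v first, then the rest, equals resolving v :: vs at once
theorem pvMF_keepLast (keep : Int → Bool) (vs : List Int) (v : Int) (a : List Int)
    (hv : v ∉ vs) (hk : keep v = true) :
    pvMF keep vs (pvKeepLast v a) = pvMF keep (v :: vs) a := by
  induction a with
  | nil => rfl
  | cons x t ih =>
    by_cases hx : x = v
    · subst hx
      by_cases hm : x ∈ t
      · simp [pvKeepLast, hm, ih, pvMF, hk]
      · simp [pvKeepLast, hm, pvMF, hv, hk, ih]
    · have hmem : x ∈ pvKeepLast v t ↔ x ∈ t := pvMem_keepLast v x t hx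
      by_cases hxs : x ∈ vs
      · simp [pvKeepLast, hx, pvMF, hxs, hmem, ih]
      · simp [pvKeepLast, hx, pvMF, hxs, hx, ih]

theorem pvMF_filter (keep : Int → Bool) (vs : List Int) (v : Int) (a : List Int)
    (hv : v ∉ vs) (hk : keep v = false) :
    pvMF keep vs (a.filter (fun x => x != v)) = pvMF keep (v :: vs) a := by
  induction a with
  | nil => rfl
  | cons x t ih =>
    by_cases hx : x = v
    · subst hx
      simp [List.filter_cons, pvMF, hk, ih]
    · have hmem : x ∈ t.filter (fun y => y != v) ↔ x ∈ t := by
        simp [List.mem_filter, hx]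
      by_cases hxs : x ∈ vs
      · simp [List.filter_cons, hx, pvMF, hxs, hmem, ih]
      · simp [List.filter_cons, hx, pvMF, hxs, ih]

theorem pvMF_nil (keep : Int → Bool) (a : List Int) : pvMF keep [] a = a := by
  induction a with
  | nil => rfl
  | cons x t ih => simp [pvMF, ih]

-- the fold of A's loop over distinct values whose counts agree with ca/cb
theorem pvFoldA (ca cb : Int → Nat) :
    ∀ (vs : List Int) (a b : List Int), vs.Nodup →
    (∀ v ∈ vs, a.count v = ca v ∧ b.count v = cb v) →
    vs.foldl pvStepA (a, b) =
      (pvMF (fun x => decide (ca x > cb x)) vs a, pvMF (fun x => decide (cb x > ca x)) vs b) := by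
  intro vs
  induction vs with
  | nil =>
    intro a b _ _
    simp [pvMF_nil]
  | cons v vs ih =>
    intro a b hnd hc
    have hv : v ∉ vs := (List.nodup_cons.mp hnd).1
    have hcv := hc v (List.mem_cons_self)
    rw [List.foldl_cons, pvStepA_eq]
    rw [ih (pvProc v a b) (pvProc v b a) (List.nodup_cons.mp hnd).2 ?counts]
    case counts =>
      intro w hw
      have hwv : w ≠ v := fun h => hv (h ▸ hw)
      exact ⟨by rw [pvCount_proc_ne v w a b hwv]; exact (hc w (List.mem_cons_of_mem _ hw)).1,
             by rw [pvCount_proc_ne v w b a hwv]; exact (hc w (List.mem_cons_of_mem _ hw)).2⟩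
    congr 1
    · unfold pvProc
      by_cases hgt : a.count v > b.count v
      · rw [if_pos hgt]
        exact pvMF_keepLast _ vs v a hv (by simp [← hcv.1, ← hcv.2, hgt])
      · rw [if_neg hgt]
        exact pvMF_filter _ vs v a hv (by simp [← hcv.1, ← hcv.2]; omega)
    · unfold pvProc
      by_cases hgt : b.count v > a.count v
      · rw [if_pos hgt]
        exact pvMF_keepLast _ vs v b hv (by simp [← hcv.1, ← hcv.2, hgt])
      · rw [if_neg hgt]
        exact pvMF_filter _ vs v b hv (by simp [← hcv.1, ← hcv.2]; omega)

theorem pvMF_eq_lastFilter (keep : Int → Bool) (vs : List Int) (a : List Int)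
    (h : ∀ x ∈ a, x ∈ vs) : pvMF keep vs a = pvLastFilter keep a := by
  induction a with
  | nil => rfl
  | cons x t ih =>
    have hx : x ∈ vs := h x List.mem_cons_self
    have ht : ∀ y ∈ t, y ∈ vs := fun y hy => h y (List.mem_cons_of_mem _ hy)
    simp [pvMF, hx, pvLastFilter, ih ht]

theorem pvA_eq_lastFilter (l1 l2 : List Int) :
    keep_unique_values l1 l2 =
      [pvLastFilter (fun x => decide (l1.count x > l2.count x)) l1,
       pvLastFilter (fun x => decide (l2.count x > l1.count x)) l2] := by
  unfold keep_unique_values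
  rw [pvFoldA (fun x => l1.count x) (fun x => l2.count x) _ l1 l2
      (PySem.Set.nodup_ofList _) (fun v _ => ⟨rfl, rfl⟩)]
  congr 1
  · exact pvMF_eq_lastFilter _ _ l1 (fun x hx => (PySem.Set.mem_ofList _ _).mpr (List.mem_append_left _ hx))
  congr 1
  exact pvMF_eq_lastFilter _ _ l2 (fun x hx => (PySem.Set.mem_ofList _ _).mpr (List.mem_append_right _ hx))

-- ===== B side =====

-- pure recursion computing B's reversed pass: (kept-so-far in traversal order, seen)
def pvFP (keep : Int → Bool) : List Int → PySem.Set Int → List Int × PySem.Set Int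
  | [], s => ([], s)
  | x :: t, s =>
    if keep x && !(PySem.Set.contains s x)
    then (x :: (pvFP keep t (PySem.Set.add s x)).1, (pvFP keep t (PySem.Set.add s x)).2)
    else pvFP keep t s

theorem pvFoldl_fp (keep : Int → Bool) :
    ∀ (rs : List Int) (out : List Int) (s : PySem.Set Int),
    rs.foldl (fun (st : List Int × PySem.Set Int) x =>
        if keep x && !(PySem.Set.contains st.2 x)
        then (st.1 ++ [x], PySem.Set.add st.2 x) else st) (out, s)
      = (out ++ (pvFP keep rs s).1, (pvFP keep rs s).2) := by
  intro rs
  induction rs with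
  | nil => intro out s; simp [pvFP]
  | cons x t ih =>
    intro out s
    by_cases h : (keep x && !(PySem.Set.contains s x)) = true
    · simp only [List.foldl_cons, pvFP]
      rw [if_pos h, if_pos h, ih]
      simp
    · simp only [List.foldl_cons, pvFP]
      rw [if_neg h, if_neg h, ih]

theorem pvFP_seen_mem (keep : Int → Bool) :
    ∀ (l : List Int) (s : PySem.Set Int) (x : Int),
    x ∈ (pvFP keep l s).2 ↔ x ∈ s ∨ (keep x = true ∧ x ∈ l) := by
  intro l
  induction l with
  | nil => intro s x; simp [pvFP]
  | cons y t ih =>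
    intro s x
    by_cases h : (keep y && !(PySem.Set.contains s y)) = true
    · simp only [pvFP]
      rw [if_pos h, ih]
      simp only [PySem.Set.mem_add, List.mem_cons]
      constructor
      · rintro ((hs | rfl) | ⟨hk, ht⟩)
        · exact Or.inl hs
        · exact Or.inr ⟨((Bool.and_eq_true _ _).mp h).1, Or.inl rfl⟩
        · exact Or.inr ⟨hk, Or.inr ht⟩
      · rintro (hs | ⟨hk, (rfl | ht)⟩)
        · exact Or.inl (Or.inl hs)
        · exact Or.inl (Or.inr rfl)
        · exact Or.inr ⟨hk, ht⟩
    · simp only [pvFP]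
      rw [if_neg h, ih]
      simp only [List.mem_cons]
      constructor
      · rintro (hs | ⟨hk, ht⟩)
        · exact Or.inl hs
        · exact Or.inr ⟨hk, Or.inr ht⟩
      · rintro (hs | ⟨hk, (rfl | ht)⟩)
        · exact Or.inl hs
        · left
          by_contra hns
          exact h (by simp [hk, PySem.Set.contains, hns])
        · exact Or.inr ⟨hk, ht⟩

theorem pvFP_append (keep : Int → Bool) :
    ∀ (u w : List Int) (s : PySem.Set Int),
    pvFP keep (u ++ w) s =
      ((pvFP keep u s).1 ++ (pvFP keep w (pvFP keep u s).2).1,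
       (pvFP keep w (pvFP keep u s).2).2) := by
  intro u
  induction u with
  | nil => intro w s; simp [pvFP]
  | cons x t ih =>
    intro w s
    by_cases h : (keep x && !(PySem.Set.contains s x)) = true
    · simp only [List.cons_append, pvFP]
      rw [if_pos h, if_pos h, ih]
      simp
    · simp only [List.cons_append, pvFP]
      rw [if_neg h, if_neg h, ih]

-- gl: lastFilter with an extra already-seen set
def pvGL (keep : Int → Bool) : List Int → PySem.Set Int → List Int
  | [], _ => []
  | x :: t, s =>
    if keep x && !(decide (x ∈ t)) && !(decide (x ∈ s)) then x :: pvGL keep t s else pvGL keep t s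

theorem pvFP_reverse (keep : Int → Bool) :
    ∀ (a : List Int) (s : PySem.Set Int),
    (pvFP keep a.reverse s).1.reverse =
      pvGL keep a s := by
  intro a
  induction a with
  | nil => intro s; simp [pvFP, pvGL]
  | cons x t ih =>
    intro s
    rw [List.reverse_cons, pvFP_append]
    have hseen := pvFP_seen_mem keep t.reverse s x
    set s' := (pvFP keep t.reverse s).2 with hs'
    by_cases hc : (keep x && !(PySem.Set.contains s' x)) = true
    · simp only [pvFP]
      rw [if_pos hc]
      have hk : keep x = true := ((Bool.and_eq_true _ _).mp hc).1
      have hns : x ∉ s' := by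
        have := ((Bool.and_eq_true _ _).mp hc).2
        simpa [PySem.Set.contains] using this
      have hnt : x ∉ t := by
        intro hxt
        exact hns (hseen.mpr (Or.inr ⟨hk, by simpa using hxt⟩))
      have hnss : x ∉ s := fun hx => hns (hseen.mpr (Or.inl hx))
      simp [pvGL, hk, hnt, hnss, ih]
    · simp only [pvFP]
      rw [if_neg hc]
      simp only [pvGL]
      by_cases hk : keep x = true
      · have hxs' : x ∈ s' := by
          by_contra hns
          exact hc (by simp [hk, PySem.Set.contains, hns])
        have hor : x ∈ s ∨ x ∈ t := by
          rcases hseen.mp hxs' with h | ⟨_, h⟩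
          · exact Or.inl h
          · exact Or.inr (by simpa using h)
        rcases hor with h | h
        · simp [hk, h, ih]
        · simp [hk, h, ih]
      · simp only [Bool.not_eq_true] at hk
        simp [hk, ih]


theorem pvGL_empty (keep : Int → Bool) (a : List Int) :
    pvGL keep a PySem.Set.empty = pvLastFilter keep a := by
  induction a with
  | nil => rfl
  | cons x t ih =>
    have ih' : pvGL keep t [] = pvLastFilter keep t := by simpa [PySem.Set.empty] using ih
    simp only [pvGL, pvLastFilter, PySem.Set.empty] at *
    rw [ih']
    simp

theorem pvKeepMaj_eq_lastFilter (src : List Int) (own other : PySem.Dict Int Int) :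
    pvKeepMaj src own other =
      pvLastFilter (fun x => decide (own.getD x 0 > other.getD x 0)) src := by
  unfold pvKeepMaj
  rw [pvFoldl_fp (fun x => decide (own.getD x 0 > other.getD x 0)) src.reverse [] PySem.Set.empty]
  simp only [List.nil_append]
  rw [pvFP_reverse, pvGL_empty]

theorem pvCounter_getD (l : List Int) (v : Int) : (pvCounter l).getD v 0 = (l.count v : Int) := by
  unfold pvCounter
  rw [PySem.Dict.foldl_insert_getD_add_one_eq_counter]
  exact PySem.Dict.getD_counter l v

theorem pvB_eq_lastFilter (l1 l2 : List Int) :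
    keep_unique_values_alt l1 l2 =
      [pvLastFilter (fun x => decide (l1.count x > l2.count x)) l1,
       pvLastFilter (fun x => decide (l2.count x > l1.count x)) l2] := by
  unfold keep_unique_values_alt
  rw [pvKeepMaj_eq_lastFilter, pvKeepMaj_eq_lastFilter]
  have h12 : (fun x => decide ((pvCounter l1).getD x 0 > (pvCounter l2).getD x 0))
      = (fun x => decide (l1.count x > l2.count x)) := by
    funext x
    rw [pvCounter_getD, pvCounter_getD]
    simp
  have h21 : (fun x => decide ((pvCounter l2).getD x 0 > (pvCounter l1).getD x 0))
      = (fun x => decide (l2.count x > l1.count x)) := by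
    funext x
    rw [pvCounter_getD, pvCounter_getD]
    simp
  rw [h12, h21]

-- ===== VERDICT (by name: the statement is the Claim_ definition above) =====
theorem keep_unique_values_spec : Claim_equal_keep_unique_values := by
  intro l1 l2 _
  unfold Spec_keep_unique_values
  rw [pvA_eq_lastFilter, pvB_eq_lastFilter]
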